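-- pv_equiv track=rewrite | github.com/adasey/coding | Programmers/Hash/bestAlbume.py | changeValues
-- ===== SOURCE A (Python) =====
-- def changeValues(genres, plays):
--     genres_total = {}
--     temp_sum = {}
--
--     for index, titles in enumerate(zip(genres, plays)):
--         if titles[0] in genres_total:
--             temp_sum[titles[0]] += titles[1]
--
--             if titles[1] in genres_total[titles[0]]:
--                 genres_total[titles[0]][titles[1]].append(index)
--
--             else:
--                 genres_total[titles[0]][titles[1]] = [index]
--         else:
--             temp_sum[titles[0]] = titles[1]
--             genres_total[titles[0]] = {titles[1]: [index]}
--
--     return temp_sum, genres_total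
-- ===== SOURCE B (Python) =====
-- def changeValues(genres, plays):
--     # Group (index, play) pairs per genre once, then derive both outputs from the groups.
--     groups = {}
--     for index, (genre, play) in enumerate(zip(genres, plays)):
--         groups.setdefault(genre, []).append((index, play))
--
--     temp_sum = {genre: sum(play for _, play in pairs) for genre, pairs in groups.items()}
--
--     genres_total = {}
--     for genre, pairs in groups.items():
--         inner = {}
--         for index, play in pairs:
--             inner.setdefault(play, []).append(index)
--         genres_total[genre] = inner
--
--     return temp_sum, genres_total
-- ===== Notes on version B (the rewrite author's own statement) =====
-- stated objective: alternative
-- what changed: A builds temp_sum and the nested genres_total together in one fused loop with membership branching; B makes a single grouping pass (genre -> list of (index, play) pairs) and then derives temp_sum by summing each group and genres_total by grouping each group's pairs by play.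
import Mathlib
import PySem

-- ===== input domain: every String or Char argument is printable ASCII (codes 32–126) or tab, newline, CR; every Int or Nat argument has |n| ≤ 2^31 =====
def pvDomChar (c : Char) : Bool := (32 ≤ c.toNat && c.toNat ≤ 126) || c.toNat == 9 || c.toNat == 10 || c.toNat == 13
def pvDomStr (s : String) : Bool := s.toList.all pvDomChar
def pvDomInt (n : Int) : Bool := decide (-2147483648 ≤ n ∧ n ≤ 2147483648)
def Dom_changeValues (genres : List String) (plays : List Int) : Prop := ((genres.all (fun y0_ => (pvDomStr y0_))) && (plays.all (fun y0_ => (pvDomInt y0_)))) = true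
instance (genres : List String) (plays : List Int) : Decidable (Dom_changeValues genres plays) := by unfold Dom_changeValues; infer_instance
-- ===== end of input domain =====

-- B replaces A's fused membership-branching loop by one grouping pass (genre -> list of (index, play))
-- from which both outputs are then derived; objective: alternative decomposition, same asymptotic cost.

-- ===== PORT A =====
-- A's loop body: the fused branch updating temp_sum and genres_total together.
def stepA (st : PySem.Dict String Int × PySem.Dict String (PySem.Dict Int (List Int)))
    (it : Int × String × Int) : PySem.Dict String Int × PySem.Dict String (PySem.Dict Int (List Int)) :=
  let index := it.1
  let g := it.2.1
  let p := it.2.2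
  if st.2.contains g then
    let ts' := st.1.modify g 0 (· + p)            -- temp_sum[g] += p (key present, so no KeyError)
    let inner := st.2.getD g PySem.Dict.empty     -- genres_total[g] (key present)
    let inner' := if inner.contains p then inner.insert p (inner.getD p [] ++ [index])
                  else inner.insert p [index]
    (ts', st.2.insert g inner')
  else
    (st.1.insert g p, st.2.insert g (PySem.Dict.mk [(p, [index])]))

def changeValues (genres : List String) (plays : List Int) : (List (String × Int)) × (List (String × List (Int × List Int))) :=
  let st := (PySem.List.enumerate (genres.zip plays)).foldl stepA (PySem.Dict.empty, PySem.Dict.empty)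
  (st.1.items, st.2.items.map (fun q => (q.1, q.2.items)))

-- ===== PORT B =====
-- first pass of Source B: groups.setdefault(genre, []).append((index, play))
def stepG (d : PySem.Dict String (List (Int × Int))) (it : Int × String × Int) : PySem.Dict String (List (Int × Int)) :=
  d.modify it.2.1 [] (fun l => l ++ [(it.1, it.2.2)])

def pvGroups (genres : List String) (plays : List Int) : PySem.Dict String (List (Int × Int)) :=
  (PySem.List.enumerate (genres.zip plays)).foldl stepG PySem.Dict.empty

-- inner loop of Source B: inner.setdefault(play, []).append(index)
def pvInner (pairs : List (Int × Int)) : PySem.Dict Int (List Int) :=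
  pairs.foldl (fun d ip => d.modify ip.2 [] (fun l => l ++ [ip.1])) PySem.Dict.empty

def changeValues_alt (genres : List String) (plays : List Int) : (List (String × Int)) × (List (String × List (Int × List Int))) :=
  let groups := pvGroups genres plays
  (groups.items.map (fun q => (q.1, (q.2.map (·.2)).sum)),
   groups.items.map (fun q => (q.1, (pvInner q.2).items)))

-- ===== PRECONDITION & SPEC =====
def Spec_changeValues (genres : List String) (plays : List Int) (out : (List (String × Int)) × (List (String × List (Int × List Int)))) : Prop := out = changeValues_alt genres plays
instance (genres : List String) (plays : List Int) (out : (List (String × Int)) × (List (String × List (Int × List Int)))) : Decidable (Spec_changeValues genres plays out) := by unfold Spec_changeValues; infer_instance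

-- ===== CLAIM (what is proved, stated in full; the proofs are below) =====
def Claim_equal_changeValues : Prop := ∀ (genres : List String) (plays : List Int), Dom_changeValues genres plays → Spec_changeValues genres plays (changeValues genres plays)

-- ===== LEMMAS AND PROOFS =====

-- B's two outputs, viewed as dicts derived from the grouping dict.
def deriveTS (g : PySem.Dict String (List (Int × Int))) : PySem.Dict String Int :=
  PySem.Dict.mk (g.items.map (fun q => (q.1, (q.2.map (·.2)).sum)))
def deriveGT (g : PySem.Dict String (List (Int × Int))) : PySem.Dict String (PySem.Dict Int (List Int)) :=
  PySem.Dict.mk (g.items.map (fun q => (q.1, pvInner q.2)))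

lemma contains_deriveTS (g : PySem.Dict String (List (Int × Int))) (k : String) :
    (deriveTS g).contains k = g.contains k := by
  simp [deriveTS, PySem.Dict.contains, List.any_map]; rfl

lemma contains_deriveGT (g : PySem.Dict String (List (Int × Int))) (k : String) :
    (deriveGT g).contains k = g.contains k := by
  simp [deriveGT, PySem.Dict.contains, List.any_map]; rfl

lemma keys_deriveTS (g : PySem.Dict String (List (Int × Int))) : (deriveTS g).keys = g.keys := by
  simp [deriveTS, PySem.Dict.keys, List.map_map]

lemma keys_deriveGT (g : PySem.Dict String (List (Int × Int))) : (deriveGT g).keys = g.keys := by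
  simp [deriveGT, PySem.Dict.keys, List.map_map]

lemma pvInner_append (lst : List (Int × Int)) (i p : Int) :
    pvInner (lst ++ [(i, p)]) = (pvInner lst).insert p ((pvInner lst).getD p [] ++ [i]) := by
  simp [pvInner, List.foldl_append]; rfl

lemma nodup_stepG (g : PySem.Dict String (List (Int × Int))) (it : Int × String × Int)
    (hn : g.keys.Nodup) : (stepG g it).keys.Nodup := by
  unfold stepG
  by_cases h : g.contains it.2.1 = true
  · rw [show g.modify it.2.1 [] (fun l => l ++ [(it.1, it.2.2)]) = g.insert it.2.1 (g.getD it.2.1 [] ++ [(it.1, it.2.2)]) from rfl,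
      PySem.Dict.keys_insert_of_contains g _ h]
    exact hn
  · rw [show g.modify it.2.1 [] (fun l => l ++ [(it.1, it.2.2)]) = g.insert it.2.1 (g.getD it.2.1 [] ++ [(it.1, it.2.2)]) from rfl,
      PySem.Dict.keys_insert_of_not_contains g _ (by simpa using h)]
    refine List.Nodup.append hn (List.nodup_singleton _) ?_
    intro a ha hb
    simp at hb
    subst hb
    exact absurd ((PySem.Dict.contains_iff_mem_keys g _).2 ha) h

lemma step_eq (g : PySem.Dict String (List (Int × Int))) (hn : g.keys.Nodup) (it : Int × String × Int) :
    stepA (deriveTS g, deriveGT g) it = (deriveTS (stepG g it), deriveGT (stepG g it)) := by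
  obtain ⟨i, gname, p⟩ := it
  by_cases h : g.contains gname = true
  · -- genre already present
    obtain ⟨lst, hmem⟩ : ∃ lst, (gname, lst) ∈ g.items := by
      rcases List.mem_map.1 ((PySem.Dict.contains_iff_mem_keys g gname).1 h) with ⟨q, hq, hq1⟩
      exact ⟨q.2, by rw [← hq1]; exact hq⟩
    have hget : g.getD gname [] = lst := PySem.Dict.getD_of_mem_items g hmem hn []
    have hTS : (deriveTS g).getD gname 0 = (lst.map (·.2)).sum :=
      PySem.Dict.getD_of_mem_items (deriveTS g) (List.mem_map_of_mem hmem)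
        (by rw [keys_deriveTS]; exact hn) 0
    have hGT : (deriveGT g).getD gname PySem.Dict.empty = pvInner lst :=
      PySem.Dict.getD_of_mem_items (deriveGT g) (List.mem_map_of_mem hmem)
        (by rw [keys_deriveGT]; exact hn) PySem.Dict.empty
    have hstep : stepG g (i, gname, p) = g.insert gname (lst ++ [(i, p)]) := by
      show g.insert gname (g.getD gname [] ++ [(i, p)]) = _
      rw [hget]
    have hinner : (if (pvInner lst).contains p then
          (pvInner lst).insert p ((pvInner lst).getD p [] ++ [i])
        else (pvInner lst).insert p [i]) = pvInner (lst ++ [(i, p)]) := by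
      rw [pvInner_append]
      by_cases hp : (pvInner lst).contains p = true
      · rw [if_pos hp]
      · rw [if_neg hp, PySem.Dict.getD_of_not_contains (pvInner lst) [] (by simpa using hp)]
        simp
    show (if (deriveGT g).contains gname then _ else _) = _
    rw [if_pos (by rw [contains_deriveGT]; exact h)]
    refine Prod.ext ?_ ?_
    · show (deriveTS g).insert gname ((deriveTS g).getD gname 0 + p) = deriveTS (stepG g (i, gname, p))
      rw [hTS, hstep]
      apply PySem.Dict.ext
      rw [show (deriveTS (g.insert gname (lst ++ [(i,p)]))).items
            = (g.insert gname (lst ++ [(i,p)])).items.map (fun q => (q.1, (q.2.map (·.2)).sum)) from rfl,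
        PySem.Dict.items_insert_of_contains g _ h,
        PySem.Dict.items_insert_of_contains (deriveTS g) _ (by rw [contains_deriveTS]; exact h)]
      show (g.items.map (fun q => (q.1, (q.2.map (·.2)).sum))).map _ = _
      rw [List.map_map, List.map_map]
      refine List.map_congr_left fun q _ => ?_
      by_cases hq : q.1 = gname
      · simp [hq]
      · simp [hq]
    · show (deriveGT g).insert gname _ = deriveGT (stepG g (i, gname, p))
      rw [hGT, hinner, hstep]
      apply PySem.Dict.ext
      rw [show (deriveGT (g.insert gname (lst ++ [(i,p)]))).items
            = (g.insert gname (lst ++ [(i,p)])).items.map (fun q => (q.1, pvInner q.2)) from rfl,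
        PySem.Dict.items_insert_of_contains g _ h,
        PySem.Dict.items_insert_of_contains (deriveGT g) _ (by rw [contains_deriveGT]; exact h)]
      show (g.items.map (fun q => (q.1, pvInner q.2))).map _ = _
      rw [List.map_map, List.map_map]
      refine List.map_congr_left fun q _ => ?_
      by_cases hq : q.1 = gname
      · simp [hq]
      · simp [hq]
  · -- new genre
    show (if (deriveGT g).contains gname then _ else _) = _
    rw [if_neg (by rw [contains_deriveGT]; exact h)]
    have h' : g.contains gname = false := by simpa using h
    have hstep : stepG g (i, gname, p) = g.insert gname [(i, p)] := by
      show g.insert gname (g.getD gname [] ++ [(i, p)]) = _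
      rw [PySem.Dict.getD_of_not_contains g [] h']
      simp
    refine Prod.ext ?_ ?_
    · show (deriveTS g).insert gname p = deriveTS (stepG g (i, gname, p))
      rw [hstep]
      apply PySem.Dict.ext
      rw [show (deriveTS (g.insert gname [(i,p)])).items
            = (g.insert gname [(i,p)]).items.map (fun q => (q.1, (q.2.map (·.2)).sum)) from rfl,
        PySem.Dict.items_insert_of_not_contains g _ h',
        PySem.Dict.items_insert_of_not_contains (deriveTS g) _ (by rw [contains_deriveTS]; exact h')]
      simp [deriveTS]
    · show (deriveGT g).insert gname (PySem.Dict.mk [(p, [i])]) = deriveGT (stepG g (i, gname, p))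
      rw [hstep]
      apply PySem.Dict.ext
      rw [show (deriveGT (g.insert gname [(i,p)])).items
            = (g.insert gname [(i,p)]).items.map (fun q => (q.1, pvInner q.2)) from rfl,
        PySem.Dict.items_insert_of_not_contains g _ h',
        PySem.Dict.items_insert_of_not_contains (deriveGT g) _ (by rw [contains_deriveGT]; exact h')]
      simp [deriveGT]
      rfl

lemma loop_eq (l : List (Int × String × Int)) :
    ∀ g : PySem.Dict String (List (Int × Int)), g.keys.Nodup →
      l.foldl stepA (deriveTS g, deriveGT g) = (deriveTS (l.foldl stepG g), deriveGT (l.foldl stepG g)) := by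
  induction l with
  | nil => intro g _; rfl
  | cons it rest ih =>
    intro g hn
    simp only [List.foldl_cons, step_eq g hn it]
    exact ih (stepG g it) (nodup_stepG g it hn)

-- ===== VERDICT (by name: the statement is the Claim_ definition above) =====
theorem changeValues_spec : Claim_equal_changeValues := by
  intro genres plays _
  show changeValues genres plays = changeValues_alt genres plays
  have hloop : (PySem.List.enumerate (genres.zip plays)).foldl stepA (PySem.Dict.empty, PySem.Dict.empty)
      = (deriveTS (pvGroups genres plays), deriveGT (pvGroups genres plays)) := by
    have h := loop_eq (PySem.List.enumerate (genres.zip plays)) PySem.Dict.empty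
      PySem.Dict.nodup_keys_empty
    simpa [pvGroups] using h
  show ((PySem.List.enumerate (genres.zip plays)).foldl stepA (PySem.Dict.empty, PySem.Dict.empty)
        |>.1.items,
      ((PySem.List.enumerate (genres.zip plays)).foldl stepA (PySem.Dict.empty, PySem.Dict.empty)
        |>.2.items.map (fun q => (q.1, q.2.items)))) = changeValues_alt genres plays
  rw [hloop]
  show ((deriveTS (pvGroups genres plays)).items,
      (deriveGT (pvGroups genres plays)).items.map (fun q => (q.1, q.2.items)))
    = ((pvGroups genres plays).items.map (fun q => (q.1, (q.2.map (·.2)).sum)),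
       (pvGroups genres plays).items.map (fun q => (q.1, (pvInner q.2).items)))
  refine Prod.ext rfl ?_
  show ((pvGroups genres plays).items.map (fun q => (q.1, pvInner q.2))).map (fun q => (q.1, q.2.items)) = _
  rw [List.map_map]
  rfl
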